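-- pv_equiv track=rewrite | github.com/amar0705/generative-ai | set-2/concat.py | concatenate_lists
-- ===== SOURCE A (Python) =====
-- def concatenate_lists(list1, list2):
--     result = []
--
--     # Determine the length of the shorter list
--     min_length = min(len(list1), len(list2))
--
--     # Concatenate items index-wise
--     for i in range(min_length):
--         concatenated_item = list1[i] + list2[i]
--         result.append(concatenated_item)
--
--     # Add any leftover items from the longer list
--     if len(list1) > min_length:
--         result.extend(list1[min_length:])
--     elif len(list2) > min_length:
--         result.extend(list2[min_length:])
--
--     return result
-- ===== SOURCE B (Python) =====
-- def concatenate_lists(list1, list2):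
--     # Iterator-driven structural decomposition: consume both streams in lockstep;
--     # whichever stream survives IS the remainder. No lengths, indices or slices.
--     it1, it2 = iter(list1), iter(list2)
--     result = []
--     while True:
--         try:
--             a = next(it1)
--         except StopIteration:
--             result.extend(it2)
--             return result
--         try:
--             b = next(it2)
--         except StopIteration:
--             result.append(a)
--             result.extend(it1)
--             return result
--         result.append(a + b)
-- ===== Notes on version B (the rewrite author's own statement) =====
-- stated objective: alternative
-- what changed: Replaces A's index loop over range(min(len,len)) plus length-comparison/slice leftover branches with an iterator-driven lockstep consumption of the two streams: termination is by iterator exhaustion and the surviving stream is the remainder, so no lengths, indices or slices are ever computed.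
import Mathlib
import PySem

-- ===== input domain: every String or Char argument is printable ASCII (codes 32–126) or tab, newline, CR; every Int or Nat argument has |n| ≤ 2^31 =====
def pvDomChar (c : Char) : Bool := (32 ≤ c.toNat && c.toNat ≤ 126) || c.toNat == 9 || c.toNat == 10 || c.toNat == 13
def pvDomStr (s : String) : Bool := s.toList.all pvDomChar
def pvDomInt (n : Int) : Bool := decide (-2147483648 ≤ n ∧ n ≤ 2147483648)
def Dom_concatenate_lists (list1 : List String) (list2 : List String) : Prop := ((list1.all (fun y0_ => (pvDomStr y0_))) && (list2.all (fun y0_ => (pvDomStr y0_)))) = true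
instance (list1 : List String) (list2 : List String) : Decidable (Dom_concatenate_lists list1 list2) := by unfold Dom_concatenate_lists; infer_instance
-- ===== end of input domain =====

-- B replaces A's index loop + length-comparison leftover branches with an
-- iterator-driven lockstep consumption of the two streams (no lengths, indices
-- or slices); objective: alternative.


-- ===== PORT A =====
def concatenate_lists (list1 : List String) (list2 : List String) : List String :=
  let result : List String := []
  let min_length : Int := min (PySem.List.len list1) (PySem.List.len list2)
  let result := (PySem.List.pyRange 0 min_length 1).foldl
    (fun acc i => acc ++ [PySem.List.pyGetD list1 i "" ++ PySem.List.pyGetD list2 i ""]) result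
  if PySem.List.len list1 > min_length then
    result ++ PySem.List.slice list1 (some min_length) none
  else if PySem.List.len list2 > min_length then
    result ++ PySem.List.slice list2 (some min_length) none
  else
    result

-- ===== PORT B =====
-- The while-True loop over the two iterators: `result` is the accumulator,
-- the two list arguments are the unconsumed rests of the iterators.
def pvConcatLoop : List String → List String → List String → List String
  | result, [], l2 => result ++ l2
  | result, a :: t1, [] => (result ++ [a]) ++ t1
  | result, a :: t1, b :: t2 => pvConcatLoop (result ++ [a ++ b]) t1 t2

def concatenate_lists_alt (list1 : List String) (list2 : List String) : List String :=
  pvConcatLoop [] list1 list2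

-- ===== PRECONDITION & SPEC =====
def Spec_concatenate_lists (list1 : List String) (list2 : List String) (out : List String) : Prop := out = concatenate_lists_alt list1 list2
instance (list1 : List String) (list2 : List String) (out : List String) : Decidable (Spec_concatenate_lists list1 list2 out) := by unfold Spec_concatenate_lists; infer_instance

-- ===== CLAIM (what is proved, stated in full; the proofs are below) =====
def Claim_equal_concatenate_lists : Prop := ∀ (list1 : List String) (list2 : List String), Dom_concatenate_lists list1 list2 → Spec_concatenate_lists list1 list2 (concatenate_lists list1 list2)

-- ===== LEMMAS AND PROOFS =====

-- B's loop, characterised: accumulator, then zipped prefix, then the surviving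
-- tails (one of the two drops is always empty).
theorem loop_char (l1 : List String) : ∀ (acc l2 : List String),
    pvConcatLoop acc l1 l2
      = acc ++ List.zipWith (· ++ ·) l1 l2
          ++ l1.drop (min l1.length l2.length) ++ l2.drop (min l1.length l2.length) := by
  induction l1 with
  | nil => intro acc l2; simp [pvConcatLoop]
  | cons a t1 ih =>
    intro acc l2
    cases l2 with
    | nil => simp [pvConcatLoop]
    | cons b t2 =>
      simp only [pvConcatLoop, ih, List.zipWith_cons_cons, List.length_cons,
        Nat.succ_min_succ, List.drop_succ_cons, List.append_assoc, List.cons_append,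
        List.nil_append]

theorem alt_char (l1 l2 : List String) :
    concatenate_lists_alt l1 l2
      = List.zipWith (· ++ ·) l1 l2
          ++ l1.drop (min l1.length l2.length) ++ l2.drop (min l1.length l2.length) := by
  simpa [List.append_assoc] using loop_char l1 [] l2

-- A's mapped range is exactly the zipWith of the two lists.
theorem mapRange_eq_zipWith (l1 l2 : List String) :
    (PySem.List.pyRange 0 ((min l1.length l2.length : Nat) : Int) 1).map
        (fun i => PySem.List.pyGetD l1 i "" ++ PySem.List.pyGetD l2 i "")
      = List.zipWith (· ++ ·) l1 l2 := by
  apply List.ext_getElem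
  · simp only [List.length_map, PySem.List.length_pyRange_one, List.length_zipWith]
    omega
  · intro k h1 h2
    have hk : k < min l1.length l2.length := by
      simpa [PySem.List.length_pyRange_one] using h1
    have hk1 : k < l1.length := lt_of_lt_of_le hk (min_le_left _ _)
    have hk2 : k < l2.length := lt_of_lt_of_le hk (min_le_right _ _)
    simp only [List.getElem_map, PySem.List.getElem_pyRange_one, zero_add,
      List.getElem_zipWith]
    rw [show ((k : Int)) = ((k : Nat) : Int) from rfl,
      PySem.List.pyGetD_natCast, PySem.List.pyGetD_natCast,
      List.getD_eq_getElem _ _ hk1, List.getD_eq_getElem _ _ hk2]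

theorem ports_agree (l1 l2 : List String) :
    concatenate_lists l1 l2 = concatenate_lists_alt l1 l2 := by
  unfold concatenate_lists
  simp only []
  have hmin : min (PySem.List.len l1) (PySem.List.len l2)
      = ((min l1.length l2.length : Nat) : Int) := by
    simp [PySem.List.len, Nat.cast_min]
  rw [hmin, PySem.List.foldl_append_singleton_eq_map, List.nil_append,
    mapRange_eq_zipWith, alt_char]
  by_cases h1 : PySem.List.len l1 > ((min l1.length l2.length : Nat) : Int)
  · have hlt : min l1.length l2.length < l1.length := by
      simpa [PySem.List.len] using h1
    rw [if_pos h1, PySem.List.slice_from l1 (by positivity), Int.toNat_natCast,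
      List.drop_eq_nil_of_le (as := l2) (i := min l1.length l2.length) (by omega),
      List.append_nil]
  · have hge : l1.length ≤ min l1.length l2.length := by
      simpa [PySem.List.len, not_lt] using h1
    rw [if_neg h1]
    by_cases h2 : PySem.List.len l2 > ((min l1.length l2.length : Nat) : Int)
    · rw [if_pos h2, PySem.List.slice_from l2 (by positivity), Int.toNat_natCast,
        List.drop_eq_nil_of_le (as := l1) (i := min l1.length l2.length) (by omega),
        List.append_nil]
    · have hge2 : l2.length ≤ min l1.length l2.length := by
        simpa [PySem.List.len, not_lt] using h2
      rw [if_neg h2,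
        List.drop_eq_nil_of_le (as := l1) (i := min l1.length l2.length) (by omega),
        List.drop_eq_nil_of_le (as := l2) (i := min l1.length l2.length) (by omega),
        List.append_nil, List.append_nil]

-- ===== VERDICT (by name: the statement is the Claim_ definition above) =====
theorem concatenate_lists_spec : Claim_equal_concatenate_lists := by
  intro l1 l2 _
  unfold Spec_concatenate_lists
  exact ports_agree l1 l2
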